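-- pv_equiv track=rewrite | github.com/sofiered/lina_community_edition | lina_community_version/lina/handlers.py | get_khl
-- ===== SOURCE A (Python) =====
-- from typing import Optional, TYPE_CHECKING, Pattern, List, Tuple
--
-- def get_khl(pool: List[int],
--             high_low: str,
--             high_low_count: int) -> Tuple[List[int], List[int]]:
--     indexes = (sorted(range(len(pool)),
--                       key=pool.__getitem__,
--                       reverse=high_low == 'h'))[:high_low_count]
--     keep = list()
--     drop = list()
--     for index, item in enumerate(pool):
--         if index in indexes:
--             keep.append(item)
--         else:
--             drop.append(item)
--     return keep, drop
-- ===== SOURCE B (Python) =====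
-- def get_khl(pool, high_low, high_low_count):
--     pairs = sorted(enumerate(pool), key=lambda p: p[1], reverse=high_low == 'h')
--     sel = pairs[:high_low_count]
--     rest = pairs[high_low_count:]
--     keep = [v for _, v in sorted(sel, key=lambda p: p[0])]
--     drop = [v for _, v in sorted(rest, key=lambda p: p[0])]
--     return keep, drop
-- ===== Notes on version B (the rewrite author's own statement) =====
-- stated objective: faster
-- what changed: B sorts (index, value) pairs once, slices the sorted pair list into the selected top-k and the remainder, and re-sorts each slice by index to restore pool order, instead of A's selected-index list followed by a membership-tested pass over the pool (which is quadratic in the worst case).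
import Mathlib
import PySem

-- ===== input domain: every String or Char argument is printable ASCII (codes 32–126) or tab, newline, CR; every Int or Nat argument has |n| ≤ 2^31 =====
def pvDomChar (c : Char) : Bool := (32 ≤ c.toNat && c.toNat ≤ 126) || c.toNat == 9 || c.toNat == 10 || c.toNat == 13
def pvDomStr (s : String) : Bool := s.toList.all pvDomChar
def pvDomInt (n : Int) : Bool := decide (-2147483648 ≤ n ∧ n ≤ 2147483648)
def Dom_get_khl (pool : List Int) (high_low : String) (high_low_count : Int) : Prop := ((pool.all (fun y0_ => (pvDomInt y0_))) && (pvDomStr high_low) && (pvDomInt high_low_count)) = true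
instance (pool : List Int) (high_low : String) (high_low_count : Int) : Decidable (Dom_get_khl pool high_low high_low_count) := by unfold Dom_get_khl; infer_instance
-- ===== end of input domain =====

-- B sorts (index, value) pairs once and re-sorts each slice by index, instead of A's
-- selected-index list with a membership-tested pass over the pool; objective: faster (removes the per-element membership scan).

-- ===== PORT A =====
-- pool.__getitem__ is only applied to indices from range(len(pool)), always in range,
-- so the total PySem.List.pyGetD (default 0) is exact here.
def get_khl (pool : List Int) (high_low : String) (high_low_count : Int) : List Int × List Int :=
  let indexes := PySem.List.slice
    (PySem.List.sorted (PySem.List.pyRange 0 (PySem.List.len pool) 1)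
      (fun i => PySem.List.pyGetD pool i 0) (high_low == "h"))
    none (some high_low_count)
  (PySem.List.enumerate pool).foldl
    (fun acc p => if p.1 ∈ indexes then (acc.1 ++ [p.2], acc.2) else (acc.1, acc.2 ++ [p.2]))
    ([], [])

-- ===== PORT B =====
def get_khl_alt (pool : List Int) (high_low : String) (high_low_count : Int) : List Int × List Int :=
  let pairs := PySem.List.sorted (PySem.List.enumerate pool) (fun p => p.2) (high_low == "h")
  let sel := PySem.List.slice pairs none (some high_low_count)
  let rest := PySem.List.slice pairs (some high_low_count) none
  ((PySem.List.sorted sel (fun p => p.1)).map (fun p => p.2),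
   (PySem.List.sorted rest (fun p => p.1)).map (fun p => p.2))

-- ===== PRECONDITION & SPEC =====
def Spec_get_khl (pool : List Int) (high_low : String) (high_low_count : Int) (out : List Int × List Int) : Prop := out = get_khl_alt pool high_low high_low_count
instance (pool : List Int) (high_low : String) (high_low_count : Int) (out : List Int × List Int) : Decidable (Spec_get_khl pool high_low high_low_count out) := by unfold Spec_get_khl; infer_instance

-- ===== CLAIM (what is proved, stated in full; the proofs are below) =====
def Claim_equal_get_khl : Prop := ∀ (pool : List Int) (high_low : String) (high_low_count : Int), Dom_get_khl pool high_low high_low_count → Spec_get_khl pool high_low high_low_count (get_khl pool high_low high_low_count)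

-- ===== LEMMAS AND PROOFS =====

-- stable insertion commutes with map when the comparator factors through f
theorem insertBy_map {α β : Type} (f : α → β) (b1 : α → α → Bool) (b2 : β → β → Bool)
    (h : ∀ a a', b2 (f a) (f a') = b1 a a') (x : α) (ys : List α) :
    PySem.List.insertBy b2 (f x) (ys.map f) = (PySem.List.insertBy b1 x ys).map f := by
  induction ys with
  | nil => simp [PySem.List.insertBy]
  | cons y t ih =>
    simp only [List.map_cons, PySem.List.insertBy, h]
    by_cases hb : b1 x y = true
    · simp [hb]
    · simp [hb, ih]

theorem foldl_insertBy_map {α β : Type} (f : α → β) (b1 : α → α → Bool) (b2 : β → β → Bool)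
    (h : ∀ a a', b2 (f a) (f a') = b1 a a') (l acc : List α) :
    (l.map f).foldl (fun acc y => PySem.List.insertBy b2 y acc) (acc.map f)
      = (l.foldl (fun acc x => PySem.List.insertBy b1 x acc) acc).map f := by
  induction l generalizing acc with
  | nil => rfl
  | cons x t ih =>
    simp only [List.map_cons, List.foldl_cons]
    rw [insertBy_map f b1 b2 h x acc, ih]

-- Python's stable sort commutes with map when the key factors through f
theorem sorted_map {α β κ : Type} [LinearOrder κ] (f : α → β) (l : List α) (key : β → κ) (rev : Bool) :
    PySem.List.sorted (l.map f) key rev = (PySem.List.sorted l (fun a => key (f a)) rev).map f := by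
  cases rev with
  | false =>
    rw [PySem.List.sorted_eq_foldl_insertBy, PySem.List.sorted_eq_foldl_insertBy]
    exact foldl_insertBy_map f _ _ (fun a a' => rfl) l []
  | true =>
    rw [PySem.List.sorted_rev_eq_foldl_insertBy, PySem.List.sorted_rev_eq_foldl_insertBy]
    exact foldl_insertBy_map f _ _ (fun a a' => rfl) l []

theorem slice_map {α β : Type} (f : α → β) (xs : List α) (a b : Option Int) :
    PySem.List.slice (xs.map f) a b = (PySem.List.slice xs a b).map f := by
  unfold PySem.List.slice
  cases a <;> cases b <;> simp [List.map_take, List.map_drop]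

theorem slice_split {α : Type} (xs : List α) (k : Int) :
    PySem.List.slice xs none (some k) ++ PySem.List.slice xs (some k) none = xs := by
  unfold PySem.List.slice
  show List.take (PySem.List.clampIdx xs.length k - 0) (List.drop 0 xs) ++
      List.take (xs.length - PySem.List.clampIdx xs.length k)
        (List.drop (PySem.List.clampIdx xs.length k) xs) = xs
  rw [Nat.sub_zero, List.drop_zero,
      List.take_of_length_le (l := xs.drop (PySem.List.clampIdx xs.length k)) (by simp),
      List.take_append_drop]

-- A's loop appends each item to keep or drop; as filters
theorem foldl_keep_drop (l : List (Int × Int)) (sel : List Int) (k d : List Int) :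
    l.foldl (fun acc p => if p.1 ∈ sel then (acc.1 ++ [p.2], acc.2) else (acc.1, acc.2 ++ [p.2])) (k, d)
      = (k ++ (l.filter (fun p => decide (p.1 ∈ sel))).map (fun p => p.2),
         d ++ (l.filter (fun p => !decide (p.1 ∈ sel))).map (fun p => p.2)) := by
  induction l generalizing k d with
  | nil => simp
  | cons p t ih =>
    by_cases hp : p.1 ∈ sel
    · simp [hp, ih]
    · simp [hp, ih]

-- the strictly increasing enumeration of a sub-collection of a pairwise-< list is its id-sort
theorem filter_mem_eq_sorted (R sel rest : List Int)
    (hR : R.Pairwise (· < ·)) (hperm : (sel ++ rest).Perm R) :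
    R.filter (fun i => decide (i ∈ sel)) = PySem.List.sorted sel (fun i => i)
    ∧ R.filter (fun i => !decide (i ∈ sel)) = PySem.List.sorted rest (fun i => i) := by
  have hnodupR : R.Nodup := hR.imp (fun {a b} h => ne_of_lt h)
  have hnodup : (sel ++ rest).Nodup := hperm.nodup_iff.mpr hnodupR
  have hdisj : ∀ x ∈ rest, x ∉ sel := by
    intro x hx hs
    exact (List.disjoint_of_nodup_append hnodup) hs hx
  constructor
  · refine (PySem.List.sorted_eq_of_perm_of_pairwise_lt sel (R.filter (fun i => decide (i ∈ sel))) (fun i => i) ?_ ?_).symm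
    · have h1 : (R.filter (fun i => decide (i ∈ sel))).Perm ((sel ++ rest).filter (fun i => decide (i ∈ sel))) :=
        (hperm.filter _).symm
      have h2 : (sel ++ rest).filter (fun i => decide (i ∈ sel)) = sel := by
        rw [List.filter_append]
        rw [List.filter_eq_self.mpr (by intro a ha; simpa using ha)]
        rw [List.filter_eq_nil_iff.mpr (by intro a ha; simpa using hdisj a ha)]
        simp
      rw [h2] at h1; exact h1
    · exact hR.filter _
  · refine (PySem.List.sorted_eq_of_perm_of_pairwise_lt rest (R.filter (fun i => !decide (i ∈ sel))) (fun i => i) ?_ ?_).symm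
    · have h1 : (R.filter (fun i => !decide (i ∈ sel))).Perm ((sel ++ rest).filter (fun i => !decide (i ∈ sel))) :=
        (hperm.filter _).symm
      have h2 : (sel ++ rest).filter (fun i => !decide (i ∈ sel)) = rest := by
        rw [List.filter_append]
        rw [List.filter_eq_nil_iff.mpr (by intro a ha; simpa using ha)]
        rw [List.filter_eq_self.mpr (by intro a ha; simpa using hdisj a ha)]
        simp
      rw [h2] at h1; exact h1
    · exact hR.filter _

-- ===== VERDICT (by name: the statement is the Claim_ definition above) =====
theorem get_khl_spec : Claim_equal_get_khl := by
  intro pool high_low high_low_count _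
  unfold Spec_get_khl
  simp only [get_khl, get_khl_alt]
  set rev := (high_low == "h") with hrev
  set key : Int → Int := fun i => PySem.List.pyGetD pool i 0 with hkey
  set f : Int → Int × Int := fun j => (j, PySem.List.pyGetD pool j 0) with hf
  set R := PySem.List.pyRange 0 (PySem.List.len pool) 1 with hR
  set s := PySem.List.sorted R key rev with hs
  set selIdx := PySem.List.slice s none (some high_low_count) with hsel
  set restIdx := PySem.List.slice s (some high_low_count) none with hrest
  have henum : PySem.List.enumerate pool = R.map f := PySem.List.enumerate_eq_map_pyRange pool 0
  have hpairs : PySem.List.sorted (R.map f) (fun p => p.2) rev = s.map f := by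
    rw [sorted_map f R (fun p => p.2) rev]
  have hRlt : R.Pairwise (· < ·) := PySem.List.pairwise_lt_pyRange_one 0 (PySem.List.len pool)
  have hperm : (selIdx ++ restIdx).Perm R := by
    rw [hsel, hrest, slice_split s high_low_count]
    exact PySem.List.sorted_perm R key rev
  obtain ⟨hfil1, hfil2⟩ := filter_mem_eq_sorted R selIdx restIdx hRlt hperm
  rw [henum, hpairs]
  rw [slice_map f s none (some high_low_count), slice_map f s (some high_low_count) none,
      ← hsel, ← hrest]
  rw [sorted_map f selIdx (fun p => p.1) false, sorted_map f restIdx (fun p => p.1) false]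
  rw [foldl_keep_drop]
  simp only [List.nil_append, List.filter_map, List.map_map]
  rw [show ((fun p : Int × Int => decide (p.1 ∈ selIdx)) ∘ f) = (fun i => decide (i ∈ selIdx)) from rfl,
      show ((fun p : Int × Int => !decide (p.1 ∈ selIdx)) ∘ f) = (fun i => !decide (i ∈ selIdx)) from rfl]
  rw [hfil1, hfil2]
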